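-- pv_equiv track=rewrite | github.com/paoladiazzh/Analizador-L-xico-y-Sint-ctico-Simplificado | AnalizadorLexico_SintaticoSimplificado.py | afd_num
-- ===== SOURCE A (Python) =====
-- def afd_num(cadena):
--     estado = 0
--     i = 0
--     while i < len(cadena):
--         c = cadena[i]
--         if estado == 0:
--             if c in "+-":
--                 estado = 1
--             elif c.isdigit():
--                 estado = 2
--             else:
--                 break
--         elif estado == 1:
--             if c.isdigit():
--                 estado = 2
--             else:
--                 break
--         elif estado == 2:
--             if c.isdigit():
--                 estado = 2
--             else:
--                 break
--         i += 1
--     if estado == 2: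
--         return i  # longitud del token válido
--     return 0
-- ===== SOURCE B (Python) =====
-- def afd_num(cadena):
--     # Brute force: check every prefix independently against the token
--     # grammar [+-]?digit+ and return the length of the longest match.
--     def matches(p):
--         if p[:1] in ("+", "-"):
--             p = p[1:]
--         return p != "" and all(c.isdigit() for c in p)
--     best = 0
--     for k in range(1, len(cadena) + 1):
--         if matches(cadena[:k]):
--             best = k
--     return best
-- ===== Notes on version B (the rewrite author's own statement) =====
-- stated objective: alternative
-- what changed: Replaced the single-pass DFA scan by a brute-force search over all prefixes: each prefix is independently tested against the token grammar [+-]?digit+ and the longest matching prefix length is returned.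
import Mathlib
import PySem

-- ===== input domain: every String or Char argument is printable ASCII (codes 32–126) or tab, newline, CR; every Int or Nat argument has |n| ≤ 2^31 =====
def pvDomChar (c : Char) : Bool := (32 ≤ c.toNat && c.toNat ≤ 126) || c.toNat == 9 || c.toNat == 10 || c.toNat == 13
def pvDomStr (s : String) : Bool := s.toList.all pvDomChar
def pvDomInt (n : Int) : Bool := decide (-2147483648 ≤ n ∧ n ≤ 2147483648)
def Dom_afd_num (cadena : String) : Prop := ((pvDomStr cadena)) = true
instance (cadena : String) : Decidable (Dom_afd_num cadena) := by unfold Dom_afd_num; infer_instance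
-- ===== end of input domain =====

-- B replaces A's single-pass DFA by a brute-force search over all prefixes, testing each independently against the token grammar [+-]?digit+; a different algorithm, same return values (B is O(n^2), not faster).

-- ===== PORT A =====
-- the while loop: remaining characters, estado, i; on break or exhaustion, return i if estado == 2 else 0
def afdLoopA : List Char → Nat → Nat → Nat
  | [], estado, i => if estado == 2 then i else 0
  | c :: rest, estado, i =>
    if estado == 0 then
      if c == '+' || c == '-' then afdLoopA rest 1 (i + 1)
      else if PySem.Chars.isdigit c then afdLoopA rest 2 (i + 1)
      else (if estado == 2 then i else 0)          -- break
    else if estado == 1 then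
      if PySem.Chars.isdigit c then afdLoopA rest 2 (i + 1)
      else (if estado == 2 then i else 0)          -- break
    else -- estado == 2
      if PySem.Chars.isdigit c then afdLoopA rest 2 (i + 1)
      else (if estado == 2 then i else 0)          -- break

def afd_num (cadena : String) : Int :=
  Int.ofNat (afdLoopA cadena.toList 0 0)

-- ===== PORT B =====
-- matches(p): strip an optional leading sign, then non-empty and all digits
def matchesB (p : List Char) : Bool :=
  let q := if p.take 1 = ['+'] || p.take 1 = ['-'] then p.drop 1 else p
  !q.isEmpty && q.all PySem.Chars.isdigit

-- for k in range(1, len(cadena)+1): if matches(cadena[:k]): best = k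
def afd_num_alt (cadena : String) : Int :=
  let cs := cadena.toList
  (PySem.List.pyRange 1 ((cs.length : Int) + 1) 1).foldl
    (fun best k => if matchesB (PySem.List.slice cs none (some k)) then k else best) 0

-- ===== PRECONDITION & SPEC =====
def Spec_afd_num (cadena : String) (out : Int) : Prop := out = afd_num_alt cadena
instance (cadena : String) (out : Int) : Decidable (Spec_afd_num cadena out) := by unfold Spec_afd_num; infer_instance

-- ===== CLAIM (what is proved, stated in full; the proofs are below) =====
def Claim_equal_afd_num : Prop := ∀ (cadena : String), Dom_afd_num cadena → Spec_afd_num cadena (afd_num cadena)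

-- ===== LEMMAS AND PROOFS =====
-- proof helpers: the digit-run length, the start of the matching interval, and A's result
def digitRun : List Char → Nat
  | [] => 0
  | c :: rest => if PySem.Chars.isdigit c then digitRun rest + 1 else 0

def mA : List Char → Nat
  | [] => 0
  | c :: rest =>
    if c == '+' || c == '-' then (if digitRun rest = 0 then 0 else digitRun rest + 1)
    else if PySem.Chars.isdigit c then digitRun rest + 1
    else 0

def sA : List Char → Nat
  | [] => 1
  | c :: _ => if c == '+' || c == '-' then 2 else 1

theorem digitRun_le_length (cs : List Char) : digitRun cs ≤ cs.length := by
  induction cs with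
  | nil => simp [digitRun]
  | cons c rest ih => by_cases h : PySem.Chars.isdigit c = true <;> simp [digitRun, h] <;> omega

theorem mA_le_length (cs : List Char) : mA cs ≤ cs.length := by
  cases cs with
  | nil => simp [mA]
  | cons c rest =>
    have := digitRun_le_length rest
    by_cases hs : (c == '+' || c == '-') = true
    · by_cases hd : digitRun rest = 0 <;> simp [mA, hs, hd] <;> omega
    · by_cases hd : PySem.Chars.isdigit c = true <;> simp [mA, hs, hd] <;> omega

theorem mA_zero_or_sA_le (cs : List Char) : mA cs = 0 ∨ sA cs ≤ mA cs := by
  cases cs with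
  | nil => simp [mA]
  | cons c rest =>
    by_cases hs : (c == '+' || c == '-') = true
    · by_cases hd : digitRun rest = 0 <;> simp [mA, sA, hs, hd] <;> omega
    · by_cases hd : PySem.Chars.isdigit c = true <;> simp [mA, sA, hs, hd]

-- in estado 2 the A-loop just adds the digit run
theorem afdLoopA_two (cs : List Char) (i : Nat) : afdLoopA cs 2 i = i + digitRun cs := by
  induction cs generalizing i with
  | nil => simp [afdLoopA, digitRun]
  | cons c rest ih =>
    by_cases h : PySem.Chars.isdigit c = true
    · simp [afdLoopA, digitRun, h, ih]; omega
    · simp [afdLoopA, digitRun, h]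

theorem afdLoopA_eq_mA (cs : List Char) : afdLoopA cs 0 0 = mA cs := by
  cases cs with
  | nil => simp [afdLoopA, mA]
  | cons c rest =>
    by_cases hs : (c == '+' || c == '-') = true
    · cases rest with
      | nil => simp [afdLoopA, hs, mA, digitRun]
      | cons d rest' =>
        by_cases hd : PySem.Chars.isdigit d = true
        · simp [afdLoopA, hs, hd, afdLoopA_two, mA, digitRun]; omega
        · simp [afdLoopA, hs, hd, mA, digitRun]
    · by_cases hd : PySem.Chars.isdigit c = true
      · simp [afdLoopA, hs, hd, afdLoopA_two, mA, digitRun]; omega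
      · simp [afdLoopA, hs, hd, mA, digitRun]

-- a prefix of length k ≤ len is all digits iff k ≤ digitRun
theorem take_all_digit_iff (cs : List Char) (k : Nat) (hk : k ≤ cs.length) :
    ((cs.take k).all PySem.Chars.isdigit = true) ↔ k ≤ digitRun cs := by
  induction cs generalizing k with
  | nil => simp at hk; simp [hk, digitRun]
  | cons c rest ih =>
    cases k with
    | zero => simp [digitRun]
    | succ k' =>
      simp at hk
      by_cases h : PySem.Chars.isdigit c = true
      · simp [digitRun, h, ih k' hk]
      · simp [digitRun, h]

-- matchesB on a cons, by whether the head is a sign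
theorem matchesB_cons_sign (c : Char) (q : List Char) (h : c = '+' ∨ c = '-') :
    matchesB (c :: q) = (!q.isEmpty && q.all PySem.Chars.isdigit) := by
  rcases h with h | h <;> subst h <;> simp [matchesB]

theorem matchesB_cons_nonsign (c : Char) (q : List Char) (h : ¬(c = '+' ∨ c = '-')) :
    matchesB (c :: q) = ((c :: q).all PySem.Chars.isdigit) := by
  have h1 : ¬(c = '+') := fun hh => h (Or.inl hh)
  have h2 : ¬(c = '-') := fun hh => h (Or.inr hh)
  simp [matchesB, h1, h2]

-- the matching prefixes are exactly the interval [sA, mA]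
theorem matchesB_take_iff (cs : List Char) (k : Nat) (hk1 : 1 ≤ k) (hkn : k ≤ cs.length) :
    matchesB (cs.take k) = true ↔ (sA cs ≤ k ∧ k ≤ mA cs) := by
  cases cs with
  | nil => simp at hkn; omega
  | cons c rest =>
    obtain ⟨k', rfl⟩ : ∃ k', k = k' + 1 := ⟨k - 1, by omega⟩
    have hkr : k' ≤ rest.length := by simp at hkn; omega
    have htk : (c :: rest).take (k' + 1) = c :: rest.take k' := by simp
    by_cases hsign : c = '+' ∨ c = '-'
    · have hbeq : (c == '+' || c == '-') = true := by
        rcases hsign with h | h <;> subst h <;> simp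
      rw [htk, matchesB_cons_sign _ _ hsign]
      simp only [sA, mA, hbeq, if_pos hbeq]
      simp [take_all_digit_iff rest k' hkr, List.isEmpty_iff, List.take_eq_nil_iff]
      by_cases hd : digitRun rest = 0
      · simp [hd]; omega
      · have hrest : rest ≠ [] := by
          intro hr; subst hr; simp [digitRun] at hd
        simp [hd, hrest]
        try omega
    · have hbeq : (c == '+' || c == '-') = false := by
        rcases not_or.mp hsign with ⟨h1, h2⟩
        simp [h1, h2]
      rw [htk, matchesB_cons_nonsign _ _ hsign]
      by_cases hd : PySem.Chars.isdigit c = true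
      · simp only [sA, mA, hbeq, Bool.false_eq_true, if_false, if_pos hd]
        simp [hd, take_all_digit_iff rest k' hkr]
        try omega
      · simp [sA, mA, hbeq, hd]

-- the B fold over range(1, j+1) computes the longest matching prefix length ≤ j
theorem foldB_eq (cs : List Char) (j : Nat) (hj : j ≤ cs.length) :
    (PySem.List.pyRange 1 ((j : Int) + 1) 1).foldl
      (fun best k => if matchesB (PySem.List.slice cs none (some k)) then k else best) 0
    = Int.ofNat (if j < sA cs then 0 else min j (mA cs)) := by
  induction j with
  | zero =>
    rw [PySem.List.pyRange_one_eq_nil (by omega)]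
    have : sA cs ≥ 1 := by cases cs <;> simp [sA] <;> split <;> omega
    simp
    try omega
  | succ j' ih =>
    have hj' : j' ≤ cs.length := by omega
    have hsplit : PySem.List.pyRange 1 ((↑(j' + 1) : Int) + 1) 1
        = PySem.List.pyRange 1 ((j' : Int) + 1) 1 ++ [((j' : Int) + 1)] := by
      push_cast
      exact PySem.List.pyRange_one_succ_right (by omega)
    rw [hsplit, List.foldl_append, ih hj']
    simp only [List.foldl]
    have hslice : PySem.List.slice cs none (some ((j' : Int) + 1)) = cs.take (j' + 1) := by
      have : ((j' : Int) + 1) = ((j' + 1 : Nat) : Int) := by push_cast; ring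
      rw [this, PySem.List.slice_to_natCast]
    rw [hslice]
    by_cases hm : matchesB (cs.take (j' + 1)) = true
    · have := (matchesB_take_iff cs (j' + 1) (by omega) (by omega)).mp hm
      rw [if_pos hm]
      have : ¬ (j' + 1 < sA cs) := by omega
      simp [this]; omega
    · rw [if_neg hm]
      have hiff := (matchesB_take_iff cs (j' + 1) (by omega) (by omega))
      have hnot : ¬ (sA cs ≤ j' + 1 ∧ j' + 1 ≤ mA cs) := fun h => hm (hiff.mpr h)
      have hms := mA_zero_or_sA_le cs
      by_cases h1 : j' + 1 < sA cs
      · simp [h1, show j' < sA cs by omega]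
      · have h2 : mA cs ≤ j' := by omega
        by_cases h3 : j' < sA cs
        · -- sA = j'+1 and mA ≤ j' < sA, so mA = 0
          have hm0 : mA cs = 0 := by omega
          simp [h1, h3, hm0]
        · simp [h1, h3]; omega

-- ===== VERDICT (by name: the statement is the Claim_ definition above) =====
theorem afd_num_spec : Claim_equal_afd_num := by
  intro cadena _
  unfold Spec_afd_num afd_num afd_num_alt
  rw [afdLoopA_eq_mA, foldB_eq cadena.toList cadena.toList.length (le_refl _)]
  congr 1
  have hml := mA_le_length cadena.toList
  by_cases h : cadena.toList.length < sA cadena.toList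
  · rcases mA_zero_or_sA_le cadena.toList with h0 | h0
    · rw [if_pos h, h0]
    · omega
  · rw [if_neg h]
    omega
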